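-- pv_equiv track=rewrite | github.com/Tahmid019/EduSync | Wav2Lip/22.py | analyze_accent
-- ===== SOURCE A (Python) =====
-- def analyze_accent(phonetic_transcriptions):
--     # Simple heuristic rules for detecting accents
--     accent_features = {
--         'British': ['AH0', 'R', 'T', 'AA1'],
--         'American': ['R', 'ER0', 'ER1', 'T', 'AA1', 'AE1']
--     }
--
--     accent_scores = {'British': 0, 'American': 0}
--
--     for transcription in phonetic_transcriptions:
--         for variant in transcription:
--             for phoneme in variant:
--                 for accent, features in accent_features.items():
--                     if phoneme in features:
--                         accent_scores[accent] += 1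
--
--     # Determine the accent with the highest score
--     detected_accent = max(accent_scores, key=accent_scores.get)
--     return detected_accent, accent_scores
-- ===== SOURCE B (Python) =====
-- def analyze_accent(phonetic_transcriptions):
--     # One pass builds a phoneme frequency table; accent scores are then
--     # feature-indexed sums over that table (no per-phoneme accent scan).
--     counts = {}
--     for transcription in phonetic_transcriptions:
--         for variant in transcription:
--             for phoneme in variant:
--                 counts[phoneme] = counts.get(phoneme, 0) + 1
--
--     accent_features = {
--         'British': ['AH0', 'R', 'T', 'AA1'],
--         'American': ['R', 'ER0', 'ER1', 'T', 'AA1', 'AE1']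
--     }
--     accent_scores = {accent: sum(counts.get(f, 0) for f in features)
--                      for accent, features in accent_features.items()}
--
--     detected_accent = max(accent_scores, key=accent_scores.get)
--     return detected_accent, accent_scores
-- ===== Notes on version B (the rewrite author's own statement) =====
-- stated objective: alternative
-- what changed: B builds a phoneme frequency table in one pass and computes each accent score as a feature-indexed sum over that table, instead of scanning both accents' feature lists for every phoneme occurrence.
import Mathlib
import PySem

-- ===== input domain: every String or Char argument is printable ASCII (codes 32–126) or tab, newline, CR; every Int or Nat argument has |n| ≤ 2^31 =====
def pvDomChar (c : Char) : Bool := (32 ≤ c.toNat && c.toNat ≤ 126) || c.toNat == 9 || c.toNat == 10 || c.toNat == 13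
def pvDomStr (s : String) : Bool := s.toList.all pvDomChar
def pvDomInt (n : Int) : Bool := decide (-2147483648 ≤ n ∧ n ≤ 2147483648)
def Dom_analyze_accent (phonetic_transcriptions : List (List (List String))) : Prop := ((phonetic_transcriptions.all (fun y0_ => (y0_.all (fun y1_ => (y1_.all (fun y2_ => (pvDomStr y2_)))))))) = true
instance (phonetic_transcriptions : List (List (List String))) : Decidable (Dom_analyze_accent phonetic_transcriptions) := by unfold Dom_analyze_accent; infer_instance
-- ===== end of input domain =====

-- B replaces A's per-phoneme scan over both accents' feature lists by a single-pass
-- phoneme frequency table plus feature-indexed sums (alternative algorithm, same cost class).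


-- ===== PORT A =====
-- shared constant: the accent_features dict (as its insertion-ordered items)
def accentFeatures : List (String × List String) :=
  [("British", ["AH0", "R", "T", "AA1"]), ("American", ["R", "ER0", "ER1", "T", "AA1", "AE1"])]

-- shared helper: max(accent_scores, key=accent_scores.get); the dicts always hold
-- the two accent keys, so max? is never none (the "" branch totalizes the match)
def detectedAccent (scores : PySem.Dict String Int) : String :=
  match PySem.List.max? scores.keys (fun k => scores.getD k 0) with
  | some m => m
  | none => ""

def analyze_accent (phonetic_transcriptions : List (List (List String))) : String × (List (String × Int)) :=
  let scores :=
    phonetic_transcriptions.foldl (fun s transcription =>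
      transcription.foldl (fun s variant =>
        variant.foldl (fun s phoneme =>
          accentFeatures.foldl (fun s af =>
            if af.2.contains phoneme then s.modify af.1 0 (· + 1) else s) s) s) s)
      (PySem.Dict.ofList [("British", 0), ("American", 0)])
  (detectedAccent scores, scores.items)

-- ===== PORT B =====
def analyze_accent_alt (phonetic_transcriptions : List (List (List String))) : String × (List (String × Int)) :=
  let counts :=
    phonetic_transcriptions.foldl (fun d transcription =>
      transcription.foldl (fun d variant =>
        variant.foldl (fun d phoneme => d.modify phoneme 0 (· + 1)) d) d)
      (PySem.Dict.empty : PySem.Dict String Int)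
  let scores : PySem.Dict String Int :=
    PySem.Dict.ofList
      (accentFeatures.map (fun af => (af.1, af.2.foldl (fun s f => s + counts.getD f 0) 0)))
  (detectedAccent scores, scores.items)

-- ===== PRECONDITION & SPEC =====
def Spec_analyze_accent (phonetic_transcriptions : List (List (List String))) (out : String × (List (String × Int))) : Prop := out = analyze_accent_alt phonetic_transcriptions
instance (phonetic_transcriptions : List (List (List String))) (out : String × (List (String × Int))) : Decidable (Spec_analyze_accent phonetic_transcriptions out) := by unfold Spec_analyze_accent; infer_instance

-- ===== CLAIM (what is proved, stated in full; the proofs are below) =====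
def Claim_equal_analyze_accent : Prop := ∀ (phonetic_transcriptions : List (List (List String))), Dom_analyze_accent phonetic_transcriptions → Spec_analyze_accent phonetic_transcriptions (analyze_accent phonetic_transcriptions)

-- ===== LEMMAS AND PROOFS =====

-- a triply nested fold is a fold over the flattened phoneme list
theorem fold3_eq_foldl_flat {σ : Type} (f : σ → String → σ)
    (ts : List (List (List String))) (d : σ) :
    ts.foldl (fun s tr => tr.foldl (fun s v => v.foldl f s) s) d
      = (ts.flatMap (fun tr => tr.flatMap (fun v => v))).foldl f d := by
  simp [List.flatMap_def, List.foldl_flatten, List.foldl_map]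

-- indicator sum over a duplicate-free feature list
theorem sum_map_indicator (x : String) :
    ∀ (fs : List String), fs.Nodup →
      (fs.map (fun f => if f == x then (1 : Int) else 0)).sum
        = if fs.contains x then (1 : Int) else 0 := by
  intro fs
  induction fs with
  | nil => simp
  | cons f fs ih =>
    intro hnd
    rcases List.nodup_cons.mp hnd with ⟨hf, hnd'⟩
    rw [List.map_cons, List.sum_cons, ih hnd']
    by_cases hfx : f = x
    · subst hfx
      simp [hf]
    · simp [hfx, Ne.symm hfx]

-- summed per-feature counts = count of phonemes that are a feature
theorem sum_counts_eq_countP (fs : List String) (hnd : fs.Nodup) :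
    ∀ (l : List String),
      (fs.map (fun f => (l.count f : Int))).sum
        = ((l.countP (fun p => fs.contains p) : Nat) : Int) := by
  intro l
  induction l with
  | nil =>
    simp only [List.count_nil, List.countP_nil, Nat.cast_zero]
    exact List.sum_eq_zero (by simp)
  | cons x l ih =>
    have hsplit :
        (fs.map (fun f => ((x :: l).count f : Int))).sum
          = (fs.map (fun f => (l.count f : Int))).sum
            + (fs.map (fun f => if f == x then (1 : Int) else 0)).sum := by
      rw [← List.sum_map_add]
      refine congrArg List.sum (List.map_congr_left ?_)
      intro f _
      by_cases h : f = x <;> simp [h, Ne.symm]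
    rw [hsplit, ih, sum_map_indicator x fs hnd, List.countP_cons]
    split_ifs <;> simp

-- one phoneme step of A on the two-entry score dict
theorem stepA_eq (b a : Int) (p : String) :
    accentFeatures.foldl (fun s af =>
        if af.2.contains p then s.modify af.1 0 (· + 1) else s)
      (PySem.Dict.mk [("British", b), ("American", a)])
      = PySem.Dict.mk
          [("British", b + (if (["AH0", "R", "T", "AA1"] : List String).contains p then 1 else 0)),
           ("American", a + (if (["R", "ER0", "ER1", "T", "AA1", "AE1"] : List String).contains p then 1 else 0))] := by
  have mB : ∀ u v : Int, (PySem.Dict.mk [("British", u), ("American", v)]).modify "British" 0 (· + 1)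
      = PySem.Dict.mk [("British", u + 1), ("American", v)] := fun _ _ => rfl
  have mA : ∀ u v : Int, (PySem.Dict.mk [("British", u), ("American", v)]).modify "American" 0 (· + 1)
      = PySem.Dict.mk [("British", u), ("American", v + 1)] := fun _ _ => rfl
  show (fun s => if (["R", "ER0", "ER1", "T", "AA1", "AE1"] : List String).contains p
          then PySem.Dict.modify s "American" 0 (· + 1) else s)
        ((fun s => if (["AH0", "R", "T", "AA1"] : List String).contains p
          then PySem.Dict.modify s "British" 0 (· + 1) else s)
          (PySem.Dict.mk [("British", b), ("American", a)])) = _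
  by_cases hb : p = "AH0" ∨ p = "R" ∨ p = "T" ∨ p = "AA1" <;>
    by_cases ha : p = "R" ∨ p = "ER0" ∨ p = "ER1" ∨ p = "T" ∨ p = "AA1" ∨ p = "AE1" <;>
      simp [hb, ha, mB, mA]

-- A's whole scoring loop over a flat phoneme list, with arbitrary running scores
theorem A_loop_eq (l : List String) :
    ∀ (b a : Int),
      l.foldl (fun s p =>
          accentFeatures.foldl (fun s af =>
            if af.2.contains p then s.modify af.1 0 (· + 1) else s) s)
        (PySem.Dict.mk [("British", b), ("American", a)])
        = PySem.Dict.mk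
            [("British", b + ((l.countP (fun p => (["AH0", "R", "T", "AA1"] : List String).contains p) : Nat) : Int)),
             ("American", a + ((l.countP (fun p => (["R", "ER0", "ER1", "T", "AA1", "AE1"] : List String).contains p) : Nat) : Int))] := by
  induction l with
  | nil => intro b a; simp
  | cons x l ih =>
    intro b a
    rw [List.foldl_cons, stepA_eq, ih, List.countP_cons, List.countP_cons]
    apply PySem.Dict.ext
    by_cases hb : x = "AH0" ∨ x = "R" ∨ x = "T" ∨ x = "AA1" <;>
      by_cases ha : x = "R" ∨ x = "ER0" ∨ x = "ER1" ∨ x = "T" ∨ x = "AA1" ∨ x = "AE1" <;>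
        simp [hb, ha] <;> omega

-- the two score dicts coincide
theorem scores_eq (ts : List (List (List String))) :
    ts.foldl (fun s transcription =>
        transcription.foldl (fun s variant =>
          variant.foldl (fun s phoneme =>
            accentFeatures.foldl (fun s af =>
              if af.2.contains phoneme then s.modify af.1 0 (· + 1) else s) s) s) s)
      (PySem.Dict.ofList [("British", 0), ("American", 0)])
      = PySem.Dict.ofList
          (accentFeatures.map (fun af =>
            (af.1, af.2.foldl (fun s f =>
              s + (ts.foldl (fun d transcription =>
                    transcription.foldl (fun d variant =>
                      variant.foldl (fun d phoneme => d.modify phoneme 0 (· + 1)) d) d)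
                  (PySem.Dict.empty : PySem.Dict String Int)).getD f 0) 0))) := by
  rw [fold3_eq_foldl_flat, fold3_eq_foldl_flat]
  set l := ts.flatMap (fun tr => tr.flatMap (fun v => v)) with hl
  have hcnt : (l.foldl (fun d p => d.modify p 0 (· + 1)) PySem.Dict.empty) = PySem.Dict.counter l :=
    (PySem.Dict.counter_eq_foldl l).symm
  rw [show (PySem.Dict.ofList [("British", 0), ("American", 0)] : PySem.Dict String Int)
        = PySem.Dict.mk [("British", 0), ("American", 0)] from rfl,
      A_loop_eq, hcnt]
  have hb := sum_counts_eq_countP (["AH0", "R", "T", "AA1"] : List String) (by decide) l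
  have ha := sum_counts_eq_countP (["R", "ER0", "ER1", "T", "AA1", "AE1"] : List String) (by decide) l
  simp only [accentFeatures, List.map_cons, List.map_nil]
  rw [show ∀ u v : Int, (PySem.Dict.ofList [("British", u), ("American", v)] : PySem.Dict String Int)
        = PySem.Dict.mk [("British", u), ("American", v)] from fun u v => rfl]
  simp only [PySem.List.foldl_add, PySem.Dict.getD_counter, zero_add]
  rw [hb, ha]

-- ===== VERDICT (by name: the statement is the Claim_ definition above) =====
theorem analyze_accent_spec : Claim_equal_analyze_accent := by
  intro ts _
  unfold Spec_analyze_accent analyze_accent analyze_accent_alt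
  rw [scores_eq]
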